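-- pv_equiv track=rewrite | github.com/kabzzy/RaindropDigest | backend/main.py | normalize_summary_length
-- ===== SOURCE A (Python) =====
-- def normalize_summary_length(text: str, min_words: int, max_words: int) -> str:
--     words = [word for word in text.strip().split() if word]
--     if len(words) > max_words:
--         return " ".join(words[:max_words])
--
--     if len(words) >= min_words:
--         return " ".join(words)
--
--     filler = (
--         "Additional context from the source is limited, but this fallback summary preserves "
--         "the main ideas, supporting details, and practical implications that were available "
--         "from the extracted text so the reader can still understand the link without opening it."
--     )
--     filler_words = filler.split()
--     merged = list(words)
--     while len(merged) < min_words: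
--         merged.extend(filler_words)
--     return " ".join(merged[:max_words])
-- ===== SOURCE B (Python) =====
-- FILLER = (
--     "Additional context from the source is limited, but this fallback summary preserves "
--     "the main ideas, supporting details, and practical implications that were available "
--     "from the extracted text so the reader can still understand the link without opening it."
-- )
--
-- def normalize_summary_length(text: str, min_words: int, max_words: int) -> str:
--     words = text.split()
--     if len(words) > max_words:
--         return " ".join(words[:max_words])
--     if len(words) >= min_words:
--         return " ".join(words)
--     filler_words = FILLER.split()
--     needed = min_words - len(words)
--     reps = -(-needed // len(filler_words))  # ceiling division, >= 1 here
--     return " ".join((words + filler_words * reps)[:max_words])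
-- ===== Notes on version B (the rewrite author's own statement) =====
-- stated objective: simpler
-- what changed: The while-loop that repeatedly extends the word list with the filler is replaced by a closed-form ceiling-division repetition count with list multiplication, and the redundant strip+filter word pass is collapsed into a plain text.split().
import Mathlib
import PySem

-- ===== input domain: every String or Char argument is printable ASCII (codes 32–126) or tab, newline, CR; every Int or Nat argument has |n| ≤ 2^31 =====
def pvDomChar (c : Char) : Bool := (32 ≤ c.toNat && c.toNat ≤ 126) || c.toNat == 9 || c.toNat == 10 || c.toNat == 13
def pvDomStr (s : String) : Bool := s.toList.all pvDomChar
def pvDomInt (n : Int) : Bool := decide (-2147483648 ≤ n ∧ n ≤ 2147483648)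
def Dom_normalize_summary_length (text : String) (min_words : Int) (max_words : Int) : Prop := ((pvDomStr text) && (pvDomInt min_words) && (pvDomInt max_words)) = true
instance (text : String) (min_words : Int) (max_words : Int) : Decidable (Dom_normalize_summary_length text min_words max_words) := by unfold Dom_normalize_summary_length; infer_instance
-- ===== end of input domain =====

-- B replaces A's iterative filler-padding loop (and A's redundant strip + filter word pass) by a
-- closed-form ceiling-division repetition count with list multiplication (objective: simpler).

-- ===== PORT A =====
def fillerA : String := "Additional context from the source is limited, but this fallback summary preserves the main ideas, supporting details, and practical implications that were available from the extracted text so the reader can still understand the link without opening it."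

-- filler_words = filler.split()
def fillerWordsA : List String := PySem.Str.split₀ fillerA

-- needed by padLoopA's termination argument, so it stays above the port
set_option maxRecDepth 8192 in
theorem fillerWordsA_length : fillerWordsA.length = 38 := by decide

-- while len(merged) < min_words: merged.extend(filler_words)
def padLoopA (min_words : Int) (merged : List String) : List String :=
  if h : (merged.length : Int) < min_words then
    padLoopA min_words (merged ++ fillerWordsA)
  else merged
termination_by (min_words - merged.length).toNat
decreasing_by
  simp only [List.length_append]
  have := fillerWordsA_length
  omega

def normalize_summary_length (text : String) (min_words : Int) (max_words : Int) : String :=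
  -- words = [word for word in text.strip().split() if word]   ('if word' = word nonempty)
  let words := (PySem.Str.split₀ (PySem.Str.strip text)).filter (fun w => w != "")
  if (words.length : Int) > max_words then
    PySem.Str.join " " (PySem.List.slice words none (some max_words))
  else if (words.length : Int) ≥ min_words then
    PySem.Str.join " " words
  else
    PySem.Str.join " " (PySem.List.slice (padLoopA min_words words) none (some max_words))

-- ===== PORT B =====
def fillerB : String := "Additional context from the source is limited, but this fallback summary preserves the main ideas, supporting details, and practical implications that were available from the extracted text so the reader can still understand the link without opening it."

def normalize_summary_length_alt (text : String) (min_words : Int) (max_words : Int) : String :=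
  let words := PySem.Str.split₀ text
  if (words.length : Int) > max_words then
    PySem.Str.join " " (PySem.List.slice words none (some max_words))
  else if (words.length : Int) ≥ min_words then
    PySem.Str.join " " words
  else
    let filler_words := PySem.Str.split₀ fillerB
    let needed := min_words - words.length
    -- reps = -(-needed // len(filler_words))  (ceiling division)
    let reps := -(PySem.Int.floordiv (-needed) (filler_words.length : Int))
    -- filler_words * reps  is  PySem.List.pyRepeat filler_words reps
    PySem.Str.join " " (PySem.List.slice (words ++ PySem.List.pyRepeat filler_words reps) none (some max_words))

-- ===== PRECONDITION & SPEC =====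
def Spec_normalize_summary_length (text : String) (min_words : Int) (max_words : Int) (out : String) : Prop := out = normalize_summary_length_alt text min_words max_words
instance (text : String) (min_words : Int) (max_words : Int) (out : String) : Decidable (Spec_normalize_summary_length text min_words max_words out) := by unfold Spec_normalize_summary_length; infer_instance

-- ===== CLAIM (what is proved, stated in full; the proofs are below) =====
def Claim_equal_normalize_summary_length : Prop := ∀ (text : String) (min_words : Int) (max_words : Int), Dom_normalize_summary_length text min_words max_words → Spec_normalize_summary_length text min_words max_words (normalize_summary_length text min_words max_words)

-- ===== LEMMAS AND PROOFS =====

-- every word produced by Python's whitespace split is nonempty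
theorem split₀_go_ne_nil (l : List Char) : ∀ (cur : List Char) (acc : List (List Char)),
    (∀ w ∈ acc, w ≠ []) → ∀ w ∈ PySem.Chars.split₀.go l cur acc, w ≠ [] := by
  induction l with
  | nil =>
    intro cur acc hacc w hw
    rw [PySem.Chars.split₀.go] at hw
    split_ifs at hw with hc
    · exact hacc w (List.mem_reverse.mp hw)
    · rcases List.mem_cons.mp (List.mem_reverse.mp hw) with h | h
      · subst h; simpa using fun h' => hc (by simp [h'])
      · exact hacc w h
  | cons c rest ih =>
    intro cur acc hacc w hw
    rw [PySem.Chars.split₀.go] at hw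
    split_ifs at hw with h1 h2
    · exact ih [] acc hacc w hw
    · refine ih [] (cur.reverse :: acc) ?_ w hw
      intro v hv
      rcases List.mem_cons.mp hv with h | h
      · subst h; simpa using fun h' => h2 (by simp [h'])
      · exact hacc v h
    · exact ih (c :: cur) acc hacc w hw

-- so A's 'if word' filter keeps everything
theorem filter_split₀ (s : String) :
    (PySem.Str.split₀ s).filter (fun w => w != "") = PySem.Str.split₀ s := by
  apply List.filter_eq_self.mpr
  intro w hw
  have : w.toList ∈ List.map String.toList (PySem.Str.split₀ s) := List.mem_map_of_mem hw
  rw [PySem.Str.split₀_map_toList] at this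
  have hne : w.toList ≠ [] :=
    split₀_go_ne_nil s.toList [] [] (by simp) w.toList this
  have : w ≠ "" := by
    intro h; subst h; simp at hne
  simpa [bne_iff_ne] using this

-- split() on an all-whitespace tail just flushes the current word
theorem split₀_go_all_space (t : List Char) (ht : ∀ c ∈ t, PySem.Chars.isspace c) :
    ∀ (cur : List Char) (acc : List (List Char)),
      PySem.Chars.split₀.go t cur acc = PySem.Chars.split₀.go [] cur acc := by
  induction t with
  | nil => intro cur acc; rfl
  | cons c t' ih =>
    intro cur acc
    have hc : PySem.Chars.isspace c := ht c (by simp)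
    conv_lhs => rw [PySem.Chars.split₀.go]
    rw [if_pos hc]
    by_cases hcur : cur.isEmpty
    · rw [if_pos hcur, ih (fun d hd => ht d (by simp [hd])) [] acc]
      rw [PySem.Chars.split₀.go]
      rw [PySem.Chars.split₀.go]
      simp [List.isEmpty_iff.mp hcur]
    · rw [if_neg hcur, ih (fun d hd => ht d (by simp [hd])) [] (cur.reverse :: acc)]
      rw [PySem.Chars.split₀.go]
      rw [PySem.Chars.split₀.go]
      simp [hcur]

-- split() ignores an all-whitespace suffix
theorem split₀_go_append_spaces (t : List Char) (ht : ∀ c ∈ t, PySem.Chars.isspace c) :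
    ∀ (l cur : List Char) (acc : List (List Char)),
      PySem.Chars.split₀.go (l ++ t) cur acc = PySem.Chars.split₀.go l cur acc := by
  intro l
  induction l with
  | nil => intro cur acc; simpa using split₀_go_all_space t ht cur acc
  | cons c l' ih =>
    intro cur acc
    rw [List.cons_append, PySem.Chars.split₀.go]
    conv_rhs => rw [PySem.Chars.split₀.go]
    split_ifs <;> rw [ih]

-- split() ignores an all-whitespace prefix
theorem split₀_go_lstrip (l : List Char) :
    ∀ acc, PySem.Chars.split₀.go (List.dropWhile PySem.Chars.isspace l) [] acc
      = PySem.Chars.split₀.go l [] acc := by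
  induction l with
  | nil => intro acc; rfl
  | cons c l' ih =>
    intro acc
    by_cases hc : PySem.Chars.isspace c
    · rw [List.dropWhile_cons_of_pos hc, ih]
      conv_rhs => rw [PySem.Chars.split₀.go]
      simp [hc]
    · rw [List.dropWhile_cons_of_neg hc]

-- text.strip().split() = text.split()
theorem chars_split₀_strip (l : List Char) :
    PySem.Chars.split₀ (PySem.Chars.strip l) = PySem.Chars.split₀ l := by
  unfold PySem.Chars.strip PySem.Chars.split₀
  set p := PySem.Chars.lstrip l with hp
  have hsplit : p = PySem.Chars.rstrip p ++ (List.takeWhile PySem.Chars.isspace p.reverse).reverse := by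
    unfold PySem.Chars.rstrip
    conv_lhs => rw [← List.reverse_reverse p, ← List.takeWhile_append_dropWhile (p := PySem.Chars.isspace) (l := p.reverse)]
    rw [List.reverse_append]
  have ht : ∀ c ∈ (List.takeWhile PySem.Chars.isspace p.reverse).reverse, PySem.Chars.isspace c := by
    intro c hc
    exact List.mem_takeWhile_imp (List.mem_reverse.mp hc)
  rw [← split₀_go_append_spaces _ ht (PySem.Chars.rstrip p) [] [], ← hsplit]
  rw [hp]
  unfold PySem.Chars.lstrip
  exact split₀_go_lstrip l []

theorem split₀_strip (s : String) :
    PySem.Str.split₀ (PySem.Str.strip s) = PySem.Str.split₀ s := by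
  unfold PySem.Str.split₀
  rw [PySem.Str.toList_strip, chars_split₀_strip]

-- A's padding loop in closed form: append ceil(needed/38) copies of the 38-word filler
theorem padLoopA_eq (min_words : Int) (merged : List String)
    (h : (merged.length : Int) < min_words) :
    padLoopA min_words merged
      = merged ++ (List.replicate (-(PySem.Int.floordiv (-(min_words - merged.length)) 38)).toNat fillerWordsA).flatten := by
  have main : ∀ (n : Nat) (merged : List String), (min_words - merged.length).toNat = n →
      (merged.length : Int) < min_words →
      padLoopA min_words merged
        = merged ++ (List.replicate (-(PySem.Int.floordiv (-(min_words - merged.length)) 38)).toNat fillerWordsA).flatten := by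
    intro n
    induction n using Nat.strong_induction_on with
    | _ n ih =>
      intro merged hn h
      have hq := (PySem.Int.neg_floordiv_neg_eq_iff_of_pos
        (a := min_words - merged.length) (b := 38)
        (q := -(PySem.Int.floordiv (-(min_words - (merged.length : Int))) 38)) (by norm_num)).mp rfl
      have hlen : ((merged ++ fillerWordsA).length : Int) = (merged.length : Int) + 38 := by
        rw [List.length_append, fillerWordsA_length]; push_cast; ring
      rw [padLoopA, dif_pos h]
      by_cases hstop : ((merged.length : Int) + 38) < min_words
      · have hrec := ih (min_words - ((merged.length : Int) + 38)).toNat (by omega)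
          (merged ++ fillerWordsA) (by rw [hlen]) (by rw [hlen]; exact hstop)
        rw [hlen] at hrec
        rw [hrec, List.append_assoc]
        have hq' := (PySem.Int.neg_floordiv_neg_eq_iff_of_pos
          (a := min_words - ((merged.length : Int) + 38)) (b := 38)
          (q := -(PySem.Int.floordiv (-(min_words - ((merged.length : Int) + 38))) 38)) (by norm_num)).mp rfl
        have heq : (-(PySem.Int.floordiv (-(min_words - (merged.length : Int))) 38)).toNat
            = (-(PySem.Int.floordiv (-(min_words - ((merged.length : Int) + 38))) 38)).toNat + 1 := by
          omega
        rw [heq, List.replicate_succ, List.flatten_cons]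
      · rw [padLoopA, dif_neg (by rw [hlen]; exact hstop)]
        have heq : (-(PySem.Int.floordiv (-(min_words - (merged.length : Int))) 38)).toNat = 1 := by
          omega
        rw [heq]
        simp
  exact main _ merged rfl h

-- ===== VERDICT (by name: the statement is the Claim_ definition above) =====
theorem normalize_summary_length_spec : Claim_equal_normalize_summary_length := by
  intro text min_words max_words _
  unfold Spec_normalize_summary_length normalize_summary_length normalize_summary_length_alt
  have hw : (PySem.Str.split₀ (PySem.Str.strip text)).filter (fun w => w != "")
      = PySem.Str.split₀ text := by rw [split₀_strip]; exact filter_split₀ text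
  simp only [hw]
  split_ifs with h1 h2
  · rfl
  · rfl
  · have hlt : ((PySem.Str.split₀ text).length : Int) < min_words := by omega
    have hBA : PySem.Str.split₀ fillerB = fillerWordsA := rfl
    rw [padLoopA_eq min_words _ hlt, hBA, fillerWordsA_length]
    simp only [PySem.List.pyRepeat]
    norm_num
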